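-- pv_equiv track=rewrite | github.com/soniavaidya05/harvestaid | BACK_END/search_engine.py | searchFor
-- ===== SOURCE A (Python) =====
-- def searchFor(searchPhrase, catListings):
--     '''
--         searchFor searches for a searchPhrase inside a catListings
--
--         returns: listof the objects that match in a desired order
--     '''
--     #output lists
--     prio = {'prio1': [], 'prio2': [], 'prio3': [], 'prio4': []}
--     #They are filtered by priority, so the higher priority is put first on a list.
--     searchPhrase = searchPhrase.lower()
--     for listing in catListings:
--         if searchPhrase == listing["product name"].lower():
--             prio['prio1'].append(listing)
--         elif searchPhrase in listing["product name"].lower():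
--             prio['prio2'].append(listing)
--         elif searchPhrase in listing["location"].lower():
--             prio['prio3'].append(listing)
--         elif searchPhrase in listing['description'].lower():
--             prio['prio4'].append(listing)
--
--     res = []
--     res.extend(prio['prio1'])
--     res.extend(prio['prio2'])
--     res.extend(prio['prio3'])
--     res.extend(prio['prio4'])
--     return res
-- ===== SOURCE B (Python) =====
-- def searchFor(searchPhrase, catListings):
--     '''Rank-and-stable-sort re-implementation: one pass assigns each listing a
--     priority rank, then a stable sort by rank replaces the four append-buckets.'''
--     sp = searchPhrase.lower()
--
--     def rank(listing):
--         pn = listing["product name"].lower()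
--         if sp == pn:
--             return 1
--         if sp in pn:
--             return 2
--         if sp in listing["location"].lower():
--             return 3
--         if sp in listing["description"].lower():
--             return 4
--         return None
--
--     pairs = [(r, listing) for listing in catListings
--              for r in [rank(listing)] if r is not None]
--     pairs.sort(key=lambda p: p[0])
--     return [listing for _, listing in pairs]
-- ===== Notes on version B (the rewrite author's own statement) =====
-- stated objective: alternative
-- what changed: Replaces the four priority buckets plus concatenation with a single rank function and a stable sort of (rank, listing) pairs by rank.
import Mathlib
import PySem

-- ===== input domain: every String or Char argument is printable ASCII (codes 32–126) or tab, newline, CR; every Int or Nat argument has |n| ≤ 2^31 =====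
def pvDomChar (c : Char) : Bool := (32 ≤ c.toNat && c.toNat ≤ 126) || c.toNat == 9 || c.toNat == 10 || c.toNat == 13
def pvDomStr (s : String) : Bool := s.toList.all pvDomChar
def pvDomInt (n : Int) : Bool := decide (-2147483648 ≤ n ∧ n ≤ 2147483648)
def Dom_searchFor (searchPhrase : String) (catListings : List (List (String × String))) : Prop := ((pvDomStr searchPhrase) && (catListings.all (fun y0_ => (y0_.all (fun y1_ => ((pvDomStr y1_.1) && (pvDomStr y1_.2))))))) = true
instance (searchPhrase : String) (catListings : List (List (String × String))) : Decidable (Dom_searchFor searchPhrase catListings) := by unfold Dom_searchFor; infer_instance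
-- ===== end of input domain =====

-- B replaces A's four append-buckets + concatenation by ranking each listing and
-- stably sorting (rank, listing) pairs by rank: an alternative decomposition, same cost.

-- listing["k"]: dict lookup; Pre_ guarantees the key is present wherever Python reads it
def pvGetKey (listing : List (String × String)) (k : String) : String :=
  ((PySem.Dict.mk listing).get? k).getD ""

-- ===== PORT A =====
-- A's dict 'prio' has four fixed string keys; it is represented as a 4-tuple of lists
-- (prio1, prio2, prio3, prio4), appended to exactly as A appends.
def searchFor (searchPhrase : String) (catListings : List (List (String × String))) : List (List (String × String)) :=
  let s := PySem.Str.lower searchPhrase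
  let prio := catListings.foldl
    (fun (acc : List (List (String × String)) × List (List (String × String)) × List (List (String × String)) × List (List (String × String))) listing =>
      if s = PySem.Str.lower (pvGetKey listing "product name") then
        (acc.1 ++ [listing], acc.2.1, acc.2.2.1, acc.2.2.2)
      else if PySem.Str.isIn s (PySem.Str.lower (pvGetKey listing "product name")) then
        (acc.1, acc.2.1 ++ [listing], acc.2.2.1, acc.2.2.2)
      else if PySem.Str.isIn s (PySem.Str.lower (pvGetKey listing "location")) then
        (acc.1, acc.2.1, acc.2.2.1 ++ [listing], acc.2.2.2)
      else if PySem.Str.isIn s (PySem.Str.lower (pvGetKey listing "description")) then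
        (acc.1, acc.2.1, acc.2.2.1, acc.2.2.2 ++ [listing])
      else acc)
    ([], [], [], [])
  prio.1 ++ prio.2.1 ++ prio.2.2.1 ++ prio.2.2.2

-- ===== PORT B =====
def pvRank (s : String) (listing : List (String × String)) : Option Nat :=
  let pn := PySem.Str.lower (pvGetKey listing "product name")
  if s = pn then some 1
  else if PySem.Str.isIn s pn then some 2
  else if PySem.Str.isIn s (PySem.Str.lower (pvGetKey listing "location")) then some 3
  else if PySem.Str.isIn s (PySem.Str.lower (pvGetKey listing "description")) then some 4
  else none

def searchFor_alt (searchPhrase : String) (catListings : List (List (String × String))) : List (List (String × String)) :=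
  let s := PySem.Str.lower searchPhrase
  let pairs := catListings.filterMap (fun listing => (pvRank s listing).map (fun r => (r, listing)))
  (PySem.List.sorted pairs (fun p => p.1)).map (fun p => p.2)

-- ===== PRECONDITION & SPEC =====
-- Pre_ excludes exactly the inputs on which Python raises KeyError: a listing missing
-- a dict key at the moment A's (and B's) if/elif chain reads it.
def Pre_searchFor (searchPhrase : String) (catListings : List (List (String × String))) : Prop :=
  ∀ listing ∈ catListings,
    (PySem.Dict.mk listing).contains "product name" = true ∧
    (PySem.Str.isIn (PySem.Str.lower searchPhrase) (PySem.Str.lower (pvGetKey listing "product name")) = false →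
      (PySem.Dict.mk listing).contains "location" = true ∧
      (PySem.Str.isIn (PySem.Str.lower searchPhrase) (PySem.Str.lower (pvGetKey listing "location")) = false →
        (PySem.Dict.mk listing).contains "description" = true))
instance (searchPhrase : String) (catListings : List (List (String × String))) : Decidable (Pre_searchFor searchPhrase catListings) := by unfold Pre_searchFor; infer_instance

def pvWitness_searchFor : String × (List (List (String × String))) :=
  ("apple", [[("product name", "Apple"), ("location", "Farm"), ("description", "Fresh apples")],
             [("product name", "Pear"), ("location", "apple valley"), ("description", "juicy")]])

def Spec_searchFor (searchPhrase : String) (catListings : List (List (String × String))) (out : List (List (String × String))) : Prop := out = searchFor_alt searchPhrase catListings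
instance (searchPhrase : String) (catListings : List (List (String × String))) (out : List (List (String × String))) : Decidable (Spec_searchFor searchPhrase catListings out) := by unfold Spec_searchFor; infer_instance

-- ===== CLAIM (what is proved, stated in full; the proofs are below) =====
def Claim_equal_searchFor : Prop := ∀ (searchPhrase : String) (catListings : List (List (String × String))), Dom_searchFor searchPhrase catListings → Pre_searchFor searchPhrase catListings → Spec_searchFor searchPhrase catListings (searchFor searchPhrase catListings)

-- ===== LEMMAS AND PROOFS =====

-- named copies of the two fold steps (proof bookkeeping only; definitionally the ports' lambdas)
def pvStepA (s : String)
    (acc : List (List (String × String)) × List (List (String × String)) × List (List (String × String)) × List (List (String × String)))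
    (listing : List (String × String)) :
    List (List (String × String)) × List (List (String × String)) × List (List (String × String)) × List (List (String × String)) :=
  if s = PySem.Str.lower (pvGetKey listing "product name") then
    (acc.1 ++ [listing], acc.2.1, acc.2.2.1, acc.2.2.2)
  else if PySem.Str.isIn s (PySem.Str.lower (pvGetKey listing "product name")) then
    (acc.1, acc.2.1 ++ [listing], acc.2.2.1, acc.2.2.2)
  else if PySem.Str.isIn s (PySem.Str.lower (pvGetKey listing "location")) then
    (acc.1, acc.2.1, acc.2.2.1 ++ [listing], acc.2.2.2)
  else if PySem.Str.isIn s (PySem.Str.lower (pvGetKey listing "description")) then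
    (acc.1, acc.2.1, acc.2.2.1, acc.2.2.2 ++ [listing])
  else acc

def pvIns (acc : List (Nat × List (String × String))) (x : Nat × List (String × String)) :
    List (Nat × List (String × String)) :=
  PySem.List.insertBy (fun a b => decide (a.1 < b.1)) x acc

theorem pv_searchFor_eq (sp : String) (cat : List (List (String × String))) :
    searchFor sp cat =
      (cat.foldl (pvStepA (PySem.Str.lower sp)) ([], [], [], [])).1 ++
      (cat.foldl (pvStepA (PySem.Str.lower sp)) ([], [], [], [])).2.1 ++
      (cat.foldl (pvStepA (PySem.Str.lower sp)) ([], [], [], [])).2.2.1 ++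
      (cat.foldl (pvStepA (PySem.Str.lower sp)) ([], [], [], [])).2.2.2 := rfl

theorem pv_searchFor_alt_eq (sp : String) (cat : List (List (String × String))) :
    searchFor_alt sp cat =
      ((cat.filterMap (fun listing => (pvRank (PySem.Str.lower sp) listing).map (fun r => (r, listing)))).foldl
        pvIns []).map (fun p => p.2) := by
  simp only [searchFor_alt, PySem.List.sorted_eq_foldl_insertBy]
  rfl

-- insertBy skips a prefix in which nothing goes after x
theorem pv_insertBy_append {α : Type} (before : α → α → Bool) (x : α) (ys zs : List α)
    (h : ∀ y ∈ ys, before x y = false) :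
    PySem.List.insertBy before x (ys ++ zs) = ys ++ PySem.List.insertBy before x zs := by
  induction ys with
  | nil => simp
  | cons y ys ih =>
    simp only [List.cons_append, PySem.List.insertBy]
    rw [h y (by simp), ih (fun a ha => h a (by simp [ha]))]
    simp

-- insertBy puts x in front of a list it goes entirely before
theorem pv_insertBy_front {α : Type} (before : α → α → Bool) (x : α) (zs : List α)
    (h : ∀ y ∈ zs, before x y = true) :
    PySem.List.insertBy before x zs = x :: zs := by
  cases zs with
  | nil => rfl
  | cons y ys => simp [PySem.List.insertBy, h y (by simp)]

def pvTag (r : Nat) (xs : List (List (String × String))) : List (Nat × List (String × String)) :=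
  xs.map (fun x => (r, x))

theorem pv_tag_mem_fst {r : Nat} {xs : List (List (String × String))} {p : Nat × List (String × String)}
    (h : p ∈ pvTag r xs) : p.1 = r := by
  simp [pvTag] at h
  obtain ⟨x, _, rfl⟩ := h; rfl

-- the stable-insertion step on a bucket-shaped accumulator, for each rank
theorem pv_ins1 (l : List (String × String)) (p1 p2 p3 p4 : List (List (String × String))) :
    pvIns (pvTag 1 p1 ++ (pvTag 2 p2 ++ (pvTag 3 p3 ++ pvTag 4 p4))) (1, l)
    = pvTag 1 (p1 ++ [l]) ++ (pvTag 2 p2 ++ (pvTag 3 p3 ++ pvTag 4 p4)) := by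
  unfold pvIns
  rw [pv_insertBy_append _ _ (pvTag 1 p1) _
      (by intro y hy; have := pv_tag_mem_fst hy; simp [this]),
    pv_insertBy_front _ _ _ (by
      intro y hy
      simp only [List.mem_append] at hy
      rcases hy with hy | hy | hy <;> · have := pv_tag_mem_fst hy; simp [this])]
  simp [pvTag]

theorem pv_ins2 (l : List (String × String)) (p1 p2 p3 p4 : List (List (String × String))) :
    pvIns (pvTag 1 p1 ++ (pvTag 2 p2 ++ (pvTag 3 p3 ++ pvTag 4 p4))) (2, l)
    = pvTag 1 p1 ++ (pvTag 2 (p2 ++ [l]) ++ (pvTag 3 p3 ++ pvTag 4 p4)) := by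
  unfold pvIns
  rw [pv_insertBy_append _ _ (pvTag 1 p1) _
      (by intro y hy; have := pv_tag_mem_fst hy; simp [this]),
    pv_insertBy_append _ _ (pvTag 2 p2) _
      (by intro y hy; have := pv_tag_mem_fst hy; simp [this]),
    pv_insertBy_front _ _ _ (by
      intro y hy
      simp only [List.mem_append] at hy
      rcases hy with hy | hy <;> · have := pv_tag_mem_fst hy; simp [this])]
  simp [pvTag]

theorem pv_ins3 (l : List (String × String)) (p1 p2 p3 p4 : List (List (String × String))) :
    pvIns (pvTag 1 p1 ++ (pvTag 2 p2 ++ (pvTag 3 p3 ++ pvTag 4 p4))) (3, l)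
    = pvTag 1 p1 ++ (pvTag 2 p2 ++ (pvTag 3 (p3 ++ [l]) ++ pvTag 4 p4)) := by
  unfold pvIns
  rw [pv_insertBy_append _ _ (pvTag 1 p1) _
      (by intro y hy; have := pv_tag_mem_fst hy; simp [this]),
    pv_insertBy_append _ _ (pvTag 2 p2) _
      (by intro y hy; have := pv_tag_mem_fst hy; simp [this]),
    pv_insertBy_append _ _ (pvTag 3 p3) _
      (by intro y hy; have := pv_tag_mem_fst hy; simp [this]),
    pv_insertBy_front _ _ _ (by
      intro y hy; have := pv_tag_mem_fst hy; simp [this])]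
  simp [pvTag]

theorem pv_ins4 (l : List (String × String)) (p1 p2 p3 p4 : List (List (String × String))) :
    pvIns (pvTag 1 p1 ++ (pvTag 2 p2 ++ (pvTag 3 p3 ++ pvTag 4 p4))) (4, l)
    = pvTag 1 p1 ++ (pvTag 2 p2 ++ (pvTag 3 p3 ++ pvTag 4 (p4 ++ [l]))) := by
  unfold pvIns
  rw [pv_insertBy_append _ _ (pvTag 1 p1) _
      (by intro y hy; have := pv_tag_mem_fst hy; simp [this]),
    pv_insertBy_append _ _ (pvTag 2 p2) _
      (by intro y hy; have := pv_tag_mem_fst hy; simp [this]),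
    pv_insertBy_append _ _ (pvTag 3 p3) _
      (by intro y hy; have := pv_tag_mem_fst hy; simp [this]),
    PySem.List.insertBy_of_forall_not_before _ _ _
      (by intro y hy; have := pv_tag_mem_fst hy; simp [this])]
  simp [pvTag]

-- the loop invariant: B's insertion fold over the rank pairs tracks A's four buckets
theorem pv_inv (s : String) (cat : List (List (String × String))) :
    ∀ (p1 p2 p3 p4 : List (List (String × String))),
    (cat.filterMap (fun listing => (pvRank s listing).map (fun r => (r, listing)))).foldl
        pvIns (pvTag 1 p1 ++ (pvTag 2 p2 ++ (pvTag 3 p3 ++ pvTag 4 p4)))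
    = pvTag 1 (cat.foldl (pvStepA s) (p1, p2, p3, p4)).1 ++
      (pvTag 2 (cat.foldl (pvStepA s) (p1, p2, p3, p4)).2.1 ++
      (pvTag 3 (cat.foldl (pvStepA s) (p1, p2, p3, p4)).2.2.1 ++
       pvTag 4 (cat.foldl (pvStepA s) (p1, p2, p3, p4)).2.2.2)) := by
  induction cat with
  | nil => intro p1 p2 p3 p4; rfl
  | cons listing rest ih =>
    intro p1 p2 p3 p4
    simp only [List.filterMap_cons, List.foldl_cons, pvRank, pvStepA]
    split_ifs with h1 h2 h3 h4
    · simp only [Option.map_some, List.foldl_cons, pv_ins1]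
      exact ih (p1 ++ [listing]) p2 p3 p4
    · simp only [Option.map_some, List.foldl_cons, pv_ins2]
      exact ih p1 (p2 ++ [listing]) p3 p4
    · simp only [Option.map_some, List.foldl_cons, pv_ins3]
      exact ih p1 p2 (p3 ++ [listing]) p4
    · simp only [Option.map_some, List.foldl_cons, pv_ins4]
      exact ih p1 p2 p3 (p4 ++ [listing])
    · simp only [Option.map_none]
      exact ih p1 p2 p3 p4

-- ===== VERDICT (by name: the statement is the Claim_ definition above) =====
theorem searchFor_spec : Claim_equal_searchFor := by
  intro sp cat _ _
  unfold Spec_searchFor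
  rw [pv_searchFor_eq, pv_searchFor_alt_eq]
  have h := pv_inv (PySem.Str.lower sp) cat [] [] [] []
  simp only [pvTag, List.map_nil, List.nil_append] at h
  rw [h]
  simp [List.map_map, List.append_assoc]
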